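-- pv_equiv track=rewrite | github.com/dmikushin/shell_gpt | sgpt/model.py | _find_matching_models
-- ===== SOURCE A (Python) =====
-- def _find_matching_models(model_name, models):
--     """
--     Find models matching the given model_name.
--     Returns a tuple (exact_match, name_matches, ollama_matches).
--     """
--     if not isinstance(models, list) or not models:
--         return None, [], []
--
--     matches = []
--     exact_match = None
--
--     for model in models:
--         provider = model.get("provider", "")
--         name = model.get("name", "")
--         model_type = model.get("type", "")
--         if not provider or not name or not model_type:
--             continue
--         full_name = f"{provider}/{name}"
--         if model_name.lower() == full_name.lower():
--             exact_match = (provider, name, model_type)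
--             break
--         matches.append((provider, name, model_type))
--
--     name_matches = [m for m in matches if m[1].lower() == model_name.lower()]
--     ollama_matches = [m for m in name_matches if m[0] == "ollama"]
--
--     return exact_match, name_matches, ollama_matches
-- ===== SOURCE B (Python) =====
-- def _find_matching_models(model_name, models):
--     """
--     Find models matching the given model_name.
--     Returns a tuple (exact_match, name_matches, ollama_matches).
--     """
--     if not isinstance(models, list) or not models:
--         return None, [], []
--
--     valid = []
--     for m in models:
--         provider = m.get("provider", "")
--         name = m.get("name", "")
--         model_type = m.get("type", "")
--         if provider and name and model_type:
--             valid.append((provider, name, model_type))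
--
--     target = model_name.lower()
--     idx = next((i for i, (p, n, _) in enumerate(valid)
--                 if f"{p}/{n}".lower() == target), None)
--
--     if idx is None:
--         exact_match, prefix = None, valid
--     else:
--         exact_match, prefix = valid[idx], valid[:idx]
--
--     name_matches = [m for m in prefix if m[1].lower() == target]
--     ollama_matches = [m for m in name_matches if m[0] == "ollama"]
--     return exact_match, name_matches, ollama_matches
-- ===== Notes on version B (the rewrite author's own statement) =====
-- stated objective: alternative
-- what changed: Replaces A's single break-driven loop that fuses validity filtering, exact-match search and match accumulation with a decomposition: first collect all valid (provider,name,type) tuples, then locate the exact match by index, then filter the prefix before that index for name and ollama matches.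
import Mathlib
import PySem

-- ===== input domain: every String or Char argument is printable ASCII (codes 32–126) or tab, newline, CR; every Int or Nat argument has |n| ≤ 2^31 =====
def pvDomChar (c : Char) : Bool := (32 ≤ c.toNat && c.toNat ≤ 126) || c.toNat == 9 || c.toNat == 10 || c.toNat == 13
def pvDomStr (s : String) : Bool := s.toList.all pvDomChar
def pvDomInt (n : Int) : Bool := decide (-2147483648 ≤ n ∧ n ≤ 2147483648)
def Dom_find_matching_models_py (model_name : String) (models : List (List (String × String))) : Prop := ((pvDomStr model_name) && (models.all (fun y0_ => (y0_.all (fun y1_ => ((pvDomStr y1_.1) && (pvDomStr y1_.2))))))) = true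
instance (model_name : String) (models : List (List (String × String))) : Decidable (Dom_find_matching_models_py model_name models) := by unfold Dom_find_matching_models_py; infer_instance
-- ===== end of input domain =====

-- B replaces A's break-driven fused loop with collect-valid-tuples, find-exact-index, then filter the prefix (alternative decomposition, same cost).


-- ===== PORT A =====
def pvLoopA (model_name : String) : List (List (String × String)) → List (String × String × String) →
    (Option (String × String × String)) × List (String × String × String)
  | [], ms => (none, ms)
  | m :: rest, ms =>
    let provider := PySem.Dict.getD ⟨m⟩ "provider" ""
    let name := PySem.Dict.getD ⟨m⟩ "name" ""
    let mtype := PySem.Dict.getD ⟨m⟩ "type" ""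
    if provider == "" || name == "" || mtype == "" then
      pvLoopA model_name rest ms
    else if PySem.Str.lower model_name == PySem.Str.lower (provider ++ "/" ++ name) then
      (some (provider, name, mtype), ms)
    else
      pvLoopA model_name rest (ms ++ [(provider, name, mtype)])

def find_matching_models_py (model_name : String) (models : List (List (String × String))) : (Option (String × String × String)) × (List (String × String × String)) × (List (String × String × String)) :=
  if models.isEmpty then (none, [], [])
  else
    let r := pvLoopA model_name models []
    let name_matches := r.2.filter (fun m => PySem.Str.lower m.2.1 == PySem.Str.lower model_name)
    let ollama_matches := name_matches.filter (fun m => m.1 == "ollama")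
    (r.1, name_matches, ollama_matches)

-- ===== PORT B =====
def pvValidTuple (m : List (String × String)) : Option (String × String × String) :=
  let provider := PySem.Dict.getD ⟨m⟩ "provider" ""
  let name := PySem.Dict.getD ⟨m⟩ "name" ""
  let mtype := PySem.Dict.getD ⟨m⟩ "type" ""
  if provider == "" || name == "" || mtype == "" then none else some (provider, name, mtype)

def find_matching_models_py_alt (model_name : String) (models : List (List (String × String))) : (Option (String × String × String)) × (List (String × String × String)) × (List (String × String × String)) :=
  if models.isEmpty then (none, [], [])
  else
    let valid := models.filterMap pvValidTuple
    let target := PySem.Str.lower model_name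
    let idx? := valid.findIdx? (fun v => PySem.Str.lower (v.1 ++ "/" ++ v.2.1) == target)
    let exact_match := match idx? with | none => none | some i => valid[i]?
    let pre := match idx? with | none => valid | some i => valid.take i
    let name_matches := pre.filter (fun m => PySem.Str.lower m.2.1 == target)
    let ollama_matches := name_matches.filter (fun m => m.1 == "ollama")
    (exact_match, name_matches, ollama_matches)

-- ===== PRECONDITION & SPEC =====
def Spec_find_matching_models_py (model_name : String) (models : List (List (String × String))) (out : (Option (String × String × String)) × (List (String × String × String)) × (List (String × String × String))) : Prop := out = find_matching_models_py_alt model_name models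
instance (model_name : String) (models : List (List (String × String))) (out : (Option (String × String × String)) × (List (String × String × String)) × (List (String × String × String))) : Decidable (Spec_find_matching_models_py model_name models out) := by unfold Spec_find_matching_models_py; infer_instance

-- ===== CLAIM (what is proved, stated in full; the proofs are below) =====
def Claim_equal_find_matching_models_py : Prop := ∀ (model_name : String) (models : List (List (String × String))), Dom_find_matching_models_py model_name models → Spec_find_matching_models_py model_name models (find_matching_models_py model_name models)

-- ===== LEMMAS AND PROOFS =====

theorem pvLoopA_eq (model_name : String) (models : List (List (String × String)))
    (acc : List (String × String × String)) :
    pvLoopA model_name models acc =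
      (match (models.filterMap pvValidTuple).findIdx?
          (fun v => PySem.Str.lower (v.1 ++ "/" ++ v.2.1) == PySem.Str.lower model_name) with
       | none => (none, acc ++ models.filterMap pvValidTuple)
       | some i => ((models.filterMap pvValidTuple)[i]?,
                    acc ++ (models.filterMap pvValidTuple).take i)) := by
  induction models generalizing acc with
  | nil => simp [pvLoopA]
  | cons m rest ih =>
    simp only [pvLoopA]
    by_cases h1 : (PySem.Dict.getD ⟨m⟩ "provider" "" == "" || PySem.Dict.getD ⟨m⟩ "name" "" == ""
        || PySem.Dict.getD ⟨m⟩ "type" "" == "") = true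
    · have hv : pvValidTuple m = none := by simp only [pvValidTuple]; rw [if_pos h1]
      rw [if_pos h1, List.filterMap_cons_none hv]
      exact ih acc
    · have hv : pvValidTuple m = some (PySem.Dict.getD ⟨m⟩ "provider" "",
          PySem.Dict.getD ⟨m⟩ "name" "", PySem.Dict.getD ⟨m⟩ "type" "") := by
        simp only [pvValidTuple]; rw [if_neg h1]
      rw [if_neg h1, List.filterMap_cons_some hv]
      by_cases h2 : (PySem.Str.lower model_name ==
          PySem.Str.lower (PySem.Dict.getD ⟨m⟩ "provider" "" ++ "/" ++ PySem.Dict.getD ⟨m⟩ "name" "")) = true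
      · have h2' : (PySem.Str.lower (PySem.Dict.getD ⟨m⟩ "provider" "" ++ "/" ++ PySem.Dict.getD ⟨m⟩ "name" "")
            == PySem.Str.lower model_name) = true := by
          rw [beq_iff_eq] at h2 ⊢; exact h2.symm
        rw [if_pos h2, List.findIdx?_cons]
        simp [h2']
      · have h2' : (PySem.Str.lower (PySem.Dict.getD ⟨m⟩ "provider" "" ++ "/" ++ PySem.Dict.getD ⟨m⟩ "name" "")
            == PySem.Str.lower model_name) = false := by
          rw [beq_eq_false_iff_ne]
          exact fun e => h2 (by rw [beq_iff_eq]; exact e.symm)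
        rw [if_neg h2, ih, List.findIdx?_cons]
        simp only [h2']
        cases hfi : (rest.filterMap pvValidTuple).findIdx?
            (fun v => PySem.Str.lower (v.1 ++ "/" ++ v.2.1) == PySem.Str.lower model_name) with
        | none => simp
        | some i => simp

-- ===== VERDICT (by name: the statement is the Claim_ definition above) =====
theorem find_matching_models_py_spec : Claim_equal_find_matching_models_py := by
  intro model_name models _
  unfold Spec_find_matching_models_py find_matching_models_py find_matching_models_py_alt
  by_cases h : models.isEmpty
  · simp [h]
  · simp only [h, Bool.false_eq_true, if_false]
    rw [pvLoopA_eq]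
    cases hfi : (models.filterMap pvValidTuple).findIdx?
        (fun v => PySem.Str.lower (v.1 ++ "/" ++ v.2.1) == PySem.Str.lower model_name) with
    | none => simp
    | some i => simp
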